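-- pv_equiv track=rewrite | github.com/hoo29/advent-of-code-20 | 17/p2.py | count_grid
-- ===== SOURCE A (Python) =====
-- def count_grid(grid: list[list[list[list[str]]]], char: str):
--     count = 0
--     for x_ind in range(len(grid)):
--         for y_ind in range(len(grid[x_ind])):
--             for z_ind in range(len(grid[x_ind][y_ind])):
--                 for w_ind in range(len(grid[x_ind][y_ind][z_ind])):
--                     if grid[x_ind][y_ind][z_ind][w_ind] == char:
--                         count += 1
--     return count
-- ===== SOURCE B (Python) =====
-- def count_grid(grid: list[list[list[list[str]]]], char: str):
--     def go(x):
--         if isinstance(x, list):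
--             return sum(go(y) for y in x)
--         return 1 if x == char else 0
--     return go(grid)
-- ===== Notes on version B (the rewrite author's own statement) =====
-- stated objective: simpler
-- what changed: Replaces the four explicit index loops with a single recursion over the nested list structure that sums counts of sublists, with string leaves contributing 1 or 0.
import Mathlib
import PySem

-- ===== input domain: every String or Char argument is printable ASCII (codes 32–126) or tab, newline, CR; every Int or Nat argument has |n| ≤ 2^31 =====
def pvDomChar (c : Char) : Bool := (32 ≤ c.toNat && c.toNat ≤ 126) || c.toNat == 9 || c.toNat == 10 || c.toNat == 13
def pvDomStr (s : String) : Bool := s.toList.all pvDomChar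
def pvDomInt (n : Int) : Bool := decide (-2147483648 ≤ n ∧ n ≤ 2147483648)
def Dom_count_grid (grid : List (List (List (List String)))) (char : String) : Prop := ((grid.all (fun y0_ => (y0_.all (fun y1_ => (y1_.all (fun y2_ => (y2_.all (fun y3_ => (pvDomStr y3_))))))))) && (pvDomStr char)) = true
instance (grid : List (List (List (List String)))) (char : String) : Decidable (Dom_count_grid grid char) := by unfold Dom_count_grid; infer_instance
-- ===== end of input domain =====

-- B replaces the four explicit index loops with one recursion over the nesting that sums sublist counts (objective: simpler).
-- ===== PORT A =====
def count_grid (grid : List (List (List (List String)))) (char : String) : Int :=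
  (PySem.List.pyRange 0 (grid.length : Int) 1).foldl (fun count x_ind =>
    let plane := PySem.List.pyGetD grid x_ind []
    (PySem.List.pyRange 0 (plane.length : Int) 1).foldl (fun count y_ind =>
      let row2 := PySem.List.pyGetD plane y_ind []
      (PySem.List.pyRange 0 (row2.length : Int) 1).foldl (fun count z_ind =>
        let cell := PySem.List.pyGetD row2 z_ind []
        (PySem.List.pyRange 0 (cell.length : Int) 1).foldl (fun count w_ind =>
          if PySem.List.pyGetD cell w_ind "" = char then count + 1 else count) count) count) count) 0

-- ===== PORT B =====
def cg1 (row : List String) (char : String) : Int :=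
  (row.map (fun s => if s = char then (1 : Int) else 0)).sum
def cg2 (p : List (List String)) (char : String) : Int := (p.map (fun r => cg1 r char)).sum
def cg3 (c : List (List (List String))) (char : String) : Int := (c.map (fun p => cg2 p char)).sum
def count_grid_alt (grid : List (List (List (List String)))) (char : String) : Int :=
  (grid.map (fun c => cg3 c char)).sum

-- ===== PRECONDITION & SPEC =====
def Spec_count_grid (grid : List (List (List (List String)))) (char : String) (out : Int) : Prop := out = count_grid_alt grid char
instance (grid : List (List (List (List String)))) (char : String) (out : Int) : Decidable (Spec_count_grid grid char out) := by unfold Spec_count_grid; infer_instance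

-- ===== CLAIM =====
def Claim_equal_count_grid : Prop := ∀ (grid : List (List (List (List String)))) (char : String), Dom_count_grid grid char → Spec_count_grid grid char (count_grid grid char)

-- ===== LEMMAS AND PROOFS =====
theorem loop1_eq (row : List String) (char : String) (c : Int) :
    (PySem.List.pyRange 0 (row.length : Int) 1).foldl (fun count w_ind =>
      if PySem.List.pyGetD row w_ind "" = char then count + 1 else count) c = c + cg1 row char := by
  rw [PySem.List.foldl_pyRange_pyGetD' (xs := row) (d := "")
    (f := fun count s => if s = char then count + 1 else count) (init := c) (ha := le_refl 0)]
  simp only [Int.toNat_zero, List.drop_zero]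
  induction row generalizing c with
  | nil => simp [cg1]
  | cons x xs ih => simp only [List.foldl_cons, cg1, List.map_cons, List.sum_cons] at *; split_ifs <;> rw [ih] <;> ring

theorem loop2_eq (p : List (List String)) (char : String) (c : Int) :
    (PySem.List.pyRange 0 (p.length : Int) 1).foldl (fun count z_ind =>
      let cell := PySem.List.pyGetD p z_ind []
      (PySem.List.pyRange 0 (cell.length : Int) 1).foldl (fun count w_ind =>
        if PySem.List.pyGetD cell w_ind "" = char then count + 1 else count) count) c = c + cg2 p char := by
  rw [PySem.List.foldl_pyRange_pyGetD' (xs := p) (d := [])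
    (f := fun count cell => (PySem.List.pyRange 0 (cell.length : Int) 1).foldl (fun count w_ind =>
        if PySem.List.pyGetD cell w_ind "" = char then count + 1 else count) count) (init := c) (ha := le_refl 0)]
  simp only [Int.toNat_zero, List.drop_zero]
  induction p generalizing c with
  | nil => simp [cg2]
  | cons x xs ih => simp only [List.foldl_cons, cg2, List.map_cons, List.sum_cons] at *; rw [loop1_eq, ih]; ring

theorem loop3_eq (cu : List (List (List String))) (char : String) (c : Int) :
    (PySem.List.pyRange 0 (cu.length : Int) 1).foldl (fun count y_ind =>
      let row2 := PySem.List.pyGetD cu y_ind []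
      (PySem.List.pyRange 0 (row2.length : Int) 1).foldl (fun count z_ind =>
        let cell := PySem.List.pyGetD row2 z_ind []
        (PySem.List.pyRange 0 (cell.length : Int) 1).foldl (fun count w_ind =>
          if PySem.List.pyGetD cell w_ind "" = char then count + 1 else count) count) count) c = c + cg3 cu char := by
  rw [PySem.List.foldl_pyRange_pyGetD' (xs := cu) (d := [])
    (f := fun count row2 => (PySem.List.pyRange 0 (row2.length : Int) 1).foldl (fun count z_ind =>
        let cell := PySem.List.pyGetD row2 z_ind []
        (PySem.List.pyRange 0 (cell.length : Int) 1).foldl (fun count w_ind =>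
          if PySem.List.pyGetD cell w_ind "" = char then count + 1 else count) count) count) (init := c) (ha := le_refl 0)]
  simp only [Int.toNat_zero, List.drop_zero]
  induction cu generalizing c with
  | nil => simp [cg3]
  | cons x xs ih => simp only [List.foldl_cons, cg3, List.map_cons, List.sum_cons] at *; rw [loop2_eq, ih]; ring

theorem loop4_eq (g : List (List (List (List String)))) (char : String) (c : Int) :
    (PySem.List.pyRange 0 (g.length : Int) 1).foldl (fun count x_ind =>
      let plane := PySem.List.pyGetD g x_ind []
      (PySem.List.pyRange 0 (plane.length : Int) 1).foldl (fun count y_ind =>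
        let row2 := PySem.List.pyGetD plane y_ind []
        (PySem.List.pyRange 0 (row2.length : Int) 1).foldl (fun count z_ind =>
          let cell := PySem.List.pyGetD row2 z_ind []
          (PySem.List.pyRange 0 (cell.length : Int) 1).foldl (fun count w_ind =>
            if PySem.List.pyGetD cell w_ind "" = char then count + 1 else count) count) count) count) c
    = c + count_grid_alt g char := by
  rw [PySem.List.foldl_pyRange_pyGetD' (xs := g) (d := [])
    (f := fun count plane => (PySem.List.pyRange 0 (plane.length : Int) 1).foldl (fun count y_ind =>
        let row2 := PySem.List.pyGetD plane y_ind []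
        (PySem.List.pyRange 0 (row2.length : Int) 1).foldl (fun count z_ind =>
          let cell := PySem.List.pyGetD row2 z_ind []
          (PySem.List.pyRange 0 (cell.length : Int) 1).foldl (fun count w_ind =>
            if PySem.List.pyGetD cell w_ind "" = char then count + 1 else count) count) count) count) (init := c) (ha := le_refl 0)]
  simp only [Int.toNat_zero, List.drop_zero]
  induction g generalizing c with
  | nil => simp [count_grid_alt]
  | cons x xs ih => simp only [List.foldl_cons, count_grid_alt, List.map_cons, List.sum_cons] at *; rw [loop3_eq, ih]; ring

-- ===== VERDICT =====
theorem count_grid_spec : Claim_equal_count_grid := by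
  intro grid char _
  unfold Spec_count_grid count_grid
  rw [loop4_eq]
  ring
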